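-- pv_equiv track=rewrite | github.com/Bassant-Yasser/KENKEN-Puzzle | kenken_helper.py | Group_neighbors
-- ===== SOURCE A (Python) =====
-- def conflicting(A, a, B, b):
--     """ Return True iff A and B are conflicting.
--         Which make sure that no cell in A is equal
--         to a cell in B if they are horizontal or vertical adjacent.
--
--     Args:
--         A (tuple of cells (j, i)):  The first set of cells.
--         a (tuple of values):  The first values.
--         B (tuple of cells (j, i)):  The second set of cells.
--         b (tuple of values):  The second values.
--
--     Returns:
--         bool: True iff A and B are conflicting.
--     """
--     for i in range(len(A)):         # for each cell in A
--         for j in range(len(B)):     # for each cell in B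
--             mA = A[i]               # get the cell in A
--             mB = B[j]               # get the cell in B
--
--             ma = a[i]               # get the value for current cell in A
--             mb = b[j]               # get the value for current cell in B
--             # if the cells are horizontal or vertical adjacent and the values are equal
--             if ((mA[0] == mB[0]) != (mA[1] == mB[1])) and (ma == mb):
--                 return True         # return True iff A and B are conflicting
--     return False       # return False iff no conflicting cells are found
--
-- def Group_neighbors(groups_puzzle):
--     """ Return a dictionary of neighbors for each group in groups_puzzle.
--
--     Args:
--         groups_puzzle  (list of tuples (members, operator, target)):  The groups of the puzzle.
--
--     Returns:
--         neighbors (dict of tuples (j, i) : list of tuples (j, i)):  The neighbors for each group.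
--     """
--     neighbors = {}                      # dictionary of neighbors
--     for members, _, _ in groups_puzzle: # for each group
--         neighbors[members] = []         # initialize the neighbors list
--     for A, _, _ in groups_puzzle:       # for each group A in groups_puzzle
--         for B, _, _ in groups_puzzle:   # for each group B that is not A in groups_puzzle
--             # if the groups are not the same and the group is not already in the neighbors list
--             if A != B and B not in neighbors[A]:
--                 # if the groups are conflicting
--                 if conflicting(A, [-1] * len(A), B, [-1] * len(B)):
--                     neighbors[A].append(B) # add the group to the neighbors list
--                     neighbors[B].append(A) # add the group to the neighbors list
--     return neighbors        # return the neighbors dictionary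
-- ===== SOURCE B (Python) =====
-- def shares_line(A, B):
--     """True iff some cell of A and some cell of B share a row or a column
--     without being the same cell."""
--     return any((p[0] == q[0]) != (p[1] == q[1]) for p in A for q in B)
--
-- def Group_neighbors(groups_puzzle):
--     order = []
--     for members, _, _ in groups_puzzle:
--         if members not in order:
--             order.append(members)
--     return {m: [m2 for m2 in order if m2 != m and shares_line(m, m2)] for m in order}
-- ===== Notes on version B (the rewrite author's own statement) =====
-- stated objective: simpler
-- what changed: Replaces A's mutable dict with symmetric appends and per-pair 'B not in neighbors[A]' list scans by a direct per-group comprehension: dedup the member tuples once, then for each group list the other groups sharing a row or column, which drops A's dummy value arrays and the O(degree) membership scan on every ordered pair.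
import Mathlib
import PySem

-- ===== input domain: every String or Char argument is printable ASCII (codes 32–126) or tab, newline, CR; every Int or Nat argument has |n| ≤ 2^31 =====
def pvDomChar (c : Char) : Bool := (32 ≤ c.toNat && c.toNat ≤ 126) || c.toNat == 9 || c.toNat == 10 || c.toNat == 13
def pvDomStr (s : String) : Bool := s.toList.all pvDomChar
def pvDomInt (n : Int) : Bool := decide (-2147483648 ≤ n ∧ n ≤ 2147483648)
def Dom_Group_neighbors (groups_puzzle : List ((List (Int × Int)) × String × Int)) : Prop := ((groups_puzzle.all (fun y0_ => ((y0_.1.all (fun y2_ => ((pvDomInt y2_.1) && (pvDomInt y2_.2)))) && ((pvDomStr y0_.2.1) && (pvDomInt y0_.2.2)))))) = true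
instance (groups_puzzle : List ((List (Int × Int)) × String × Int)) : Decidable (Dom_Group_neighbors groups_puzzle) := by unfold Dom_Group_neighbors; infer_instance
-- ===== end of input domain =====

-- B replaces A's dict with symmetric appends and per-pair membership scans by a
-- one-shot dedup of the member tuples followed by a direct per-group filter
-- (objective: simpler, and it drops A's O(degree) scan on every ordered pair).

-- ===== PORT A =====
-- Port note: i and j always lie in range (they come from range(len)), so List.getD
-- never takes its default; at the only call site a and b have the same lengths as A
-- and B, so a[i] and b[j] are in range too — the port is exact there.
def conflicting (A : List (Int × Int)) (a : List Int) (B : List (Int × Int)) (b : List Int) : Bool :=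
  (List.range A.length).any (fun i =>
    (List.range B.length).any (fun j =>
      let mA := A.getD i (0, 0)
      let mB := B.getD j (0, 0)
      let ma := a.getD i 0
      let mb := b.getD j 0
      (((mA.1 == mB.1) != (mA.2 == mB.2)) && (ma == mb))))

-- Port note: every key that is looked up or appended to was initialised by the first
-- loop, so Python's neighbors[A] / neighbors[B] never raise and getD/modify with
-- default [] are exact here.
def Group_neighbors (groups_puzzle : List ((List (Int × Int)) × String × Int)) : List (List (Int × Int) × List (List (Int × Int))) :=
  let neighbors : PySem.Dict (List (Int × Int)) (List (List (Int × Int))) :=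
    groups_puzzle.foldl (fun d g => d.insert g.1 []) PySem.Dict.empty
  let neighbors :=
    groups_puzzle.foldl (fun d gA =>
      groups_puzzle.foldl (fun d gB =>
        if gA.1 != gB.1 && !((d.getD gA.1 []).contains gB.1) then
          if conflicting gA.1 (List.replicate gA.1.length (-1)) gB.1 (List.replicate gB.1.length (-1)) then
            (d.modify gA.1 [] (fun l => l ++ [gB.1])).modify gB.1 [] (fun l => l ++ [gA.1])
          else d
        else d) d) neighbors
  neighbors.items

-- ===== PORT B =====
def sharesLine (A B : List (Int × Int)) : Bool :=
  A.any (fun p => B.any (fun q => (p.1 == q.1) != (p.2 == q.2)))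

def Group_neighbors_alt (groups_puzzle : List ((List (Int × Int)) × String × Int)) : List (List (Int × Int) × List (List (Int × Int))) :=
  let order : PySem.Set (List (Int × Int)) :=
    groups_puzzle.foldl (fun s g => PySem.Set.add s g.1) PySem.Set.empty
  order.map (fun m => (m, order.filter (fun m2 => m2 != m && sharesLine m m2)))

-- ===== PRECONDITION & SPEC =====
def Spec_Group_neighbors (groups_puzzle : List ((List (Int × Int)) × String × Int)) (out : List (List (Int × Int) × List (List (Int × Int)))) : Prop := out = Group_neighbors_alt groups_puzzle
instance (groups_puzzle : List ((List (Int × Int)) × String × Int)) (out : List (List (Int × Int) × List (List (Int × Int)))) : Decidable (Spec_Group_neighbors groups_puzzle out) := by unfold Spec_Group_neighbors; infer_instance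

-- ===== CLAIM (what is proved, stated in full; the proofs are below) =====
def Claim_equal_Group_neighbors : Prop := ∀ (groups_puzzle : List ((List (Int × Int)) × String × Int)), Dom_Group_neighbors groups_puzzle → Spec_Group_neighbors groups_puzzle (Group_neighbors groups_puzzle)

-- ===== LEMMAS AND PROOFS =====

theorem conflicting_eq (A B : List (Int × Int)) :
    conflicting A (List.replicate A.length (-1)) B (List.replicate B.length (-1)) = sharesLine A B := by
  unfold conflicting sharesLine
  rw [Bool.eq_iff_iff]
  simp only [List.any_eq_true, List.mem_range]
  constructor
  · rintro ⟨i, hi, j, hj, h⟩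
    rw [List.getD_replicate _ hi, List.getD_replicate _ hj] at h
    simp only [BEq.rfl, Bool.and_true] at h
    refine ⟨A[i], List.getElem_mem hi, B[j], List.getElem_mem hj, ?_⟩
    rwa [List.getD_eq_getElem _ _ hi, List.getD_eq_getElem _ _ hj] at h
  · rintro ⟨p, hp, q, hq, h⟩
    obtain ⟨i, hi, rfl⟩ := List.mem_iff_getElem.mp hp
    obtain ⟨j, hj, rfl⟩ := List.mem_iff_getElem.mp hq
    refine ⟨i, hi, j, hj, ?_⟩
    rw [List.getD_replicate _ hi, List.getD_replicate _ hj,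
      List.getD_eq_getElem _ _ hi, List.getD_eq_getElem _ _ hj]
    simpa using h

theorem sharesLine_comm (A B : List (Int × Int)) : sharesLine A B = sharesLine B A := by
  unfold sharesLine
  rw [Bool.eq_iff_iff]
  simp only [List.any_eq_true]
  constructor
  · rintro ⟨p, hp, q, hq, h⟩
    exact ⟨q, hq, p, hp, by rw [Bool.beq_comm (a := q.1), Bool.beq_comm (a := q.2)]; exact h⟩
  · rintro ⟨p, hp, q, hq, h⟩
    exact ⟨q, hq, p, hp, by rw [Bool.beq_comm (a := q.1), Bool.beq_comm (a := q.2)]; exact h⟩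

def pvFull (O : List (List (Int × Int))) (m : List (Int × Int)) : List (List (Int × Int)) :=
  O.filter (fun y => y != m && sharesLine m y)

def pvG (O S : List (List (Int × Int))) (x : List (Int × Int)) : List (List (Int × Int)) :=
  if x ∈ S then pvFull O x
  else S.filter (fun y => y != x && sharesLine y x)

def pvIn (S : List (List (Int × Int))) (m : List (Int × Int)) (w : List (List (Int × Int)))
    (O : List (List (Int × Int))) (x : List (Int × Int)) : List (List (Int × Int)) :=
  if x = m then
    S.filter (fun y => y != m && sharesLine y m)
      ++ w.filter (fun y => decide (y ∉ S) && (y != m) && sharesLine m y)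
  else
    pvG O S x ++ (if x ∉ S ∧ x ∈ w ∧ x ≠ m ∧ sharesLine m x = true then [m] else [])

def pvStep (m : List (Int × Int)) (d : PySem.Dict (List (Int × Int)) (List (List (Int × Int))))
    (x : List (Int × Int)) : PySem.Dict (List (Int × Int)) (List (List (Int × Int))) :=
  if m != x && !((d.getD m []).contains x) then
    if sharesLine m x then
      (d.modify m [] (fun l => l ++ [x])).modify x [] (fun l => l ++ [m])
    else d
  else d

theorem pv_foldl_fixed {α β : Type} (l : List α) (f : β → α → β) (d : β)
    (h : ∀ x ∈ l, f d x = d) : l.foldl f d = d := by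
  induction l with
  | nil => rfl
  | cons x xs ih =>
      simp only [List.foldl_cons, h x (by simp)]
      exact ih (fun y hy => h y (by simp [hy]))

-- keys of a pvStep are unchanged when both m and x are already keys
theorem pvStep_keys (m x : List (Int × Int)) (d : PySem.Dict (List (Int × Int)) (List (List (Int × Int))))
    (O : List (List (Int × Int))) (hk : d.keys = O) (hm : m ∈ O) (hx : x ∈ O) :
    (pvStep m d x).keys = O := by
  unfold pvStep
  split
  · split
    · rw [PySem.Dict.keys_modify, PySem.Dict.keys_insert_of_contains, PySem.Dict.keys_modify,
        PySem.Dict.keys_insert_of_contains] <;>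
        simp [PySem.Dict.contains_iff_mem_keys, PySem.Dict.keys_modify, hk, hm, hx,
          PySem.Dict.mem_keys_insert]
    · exact hk
  · exact hk

theorem pvStep_getD (O S w : List (List (Int × Int))) (m x : List (Int × Int))
    (hmO : m ∈ O) (hmS : m ∉ S) (hxm : x ≠ m)
    (d : PySem.Dict (List (Int × Int)) (List (List (Int × Int)))) (_hk : d.keys = O)
    (hd : ∀ z ∈ O, d.getD z [] = pvIn S m w O z) :
    ∀ z ∈ O, (pvStep m d x).getD z [] = pvIn S m (PySem.Set.add w x) O z := by
  have hdm : d.getD m [] = pvIn S m w O m := hd m hmO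
  have hmem : x ∈ d.getD m [] ↔ ((x ∈ S ∧ sharesLine x m = true) ∨ (x ∈ w ∧ x ∉ S ∧ sharesLine m x = true)) := by
    rw [hdm]
    simp [pvIn, List.mem_filter, bne_iff_ne, hxm]
  by_cases hcx : sharesLine m x = true
  · by_cases hin : x ∈ d.getD m []
    · -- already recorded (or in S): the step is a no-op and the set-extension changes nothing
      have hstep : pvStep m d x = d := by
        unfold pvStep
        simp [hin]
      rw [hstep]
      intro z hz
      rw [hd z hz]
      rcases hmem.mp hin with ⟨hxS, _⟩ | ⟨hxw, _, _⟩
      · -- x ∈ S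
        by_cases hxw : x ∈ w
        · rw [PySem.Set.add_of_mem hxw]
        · rw [PySem.Set.add_of_not_mem hxw]
          unfold pvIn
          by_cases hzm : z = m
          · simp [hzm, List.filter_append, hxS]
          · simp only [if_neg hzm]
            congr 1
            refine if_congr ?_ rfl rfl
            constructor
            · rintro ⟨h1, h2, h3, h4⟩
              exact ⟨h1, List.mem_append.mpr (Or.inl h2), h3, h4⟩
            · rintro ⟨h1, h2, h3, h4⟩
              rcases List.mem_append.mp h2 with h | h
              · exact ⟨h1, h, h3, h4⟩
              · simp at h; exact absurd (h ▸ hxS) h1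
      · -- x ∈ w
        rw [PySem.Set.add_of_mem hxw]
    · -- new conflicting neighbour: both appends happen
      have hxS : x ∉ S := by
        intro hxS
        exact hin (hmem.mpr (Or.inl ⟨hxS, by rw [sharesLine_comm]; exact hcx⟩))
      have hxw : x ∉ w := fun hxw => hin (hmem.mpr (Or.inr ⟨hxw, hxS, hcx⟩))
      have hstep : pvStep m d x =
          (d.modify m [] (fun l => l ++ [x])).modify x [] (fun l => l ++ [m]) := by
        unfold pvStep
        simp [hin, hcx, bne_iff_ne, Ne.symm hxm]
      rw [hstep, PySem.Set.add_of_not_mem hxw]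
      intro z hz
      by_cases hzm : z = m
      · subst hzm
        rw [PySem.Dict.getD_modify, if_neg (Ne.symm hxm), PySem.Dict.getD_modify, if_pos rfl,
          hd z hz]
        show pvIn S z w O z ++ [x] = pvIn S z (w ++ [x]) O z
        unfold pvIn
        rw [if_pos rfl, if_pos rfl, List.filter_append, List.append_assoc]
        congr 1
        congr 1
        simp [hxS, bne_iff_ne, hxm, hcx]
      · by_cases hzx : z = x
        · subst hzx
          rw [PySem.Dict.getD_modify, if_pos rfl, PySem.Dict.getD_modify, if_neg hzm, hd z hz]
          unfold pvIn
          simp only [if_neg hzm]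
          rw [if_neg (by rintro ⟨_, h, _, _⟩; exact hxw h), if_pos ⟨hxS, by simp, hxm, hcx⟩]
          simp
        · rw [PySem.Dict.getD_modify, if_neg hzx, PySem.Dict.getD_modify, if_neg hzm, hd z hz]
          unfold pvIn
          simp only [if_neg hzm]
          congr 1
          refine if_congr ?_ rfl rfl
          constructor
          · rintro ⟨h1, h2, h3, h4⟩; exact ⟨h1, List.mem_append.mpr (Or.inl h2), h3, h4⟩
          · rintro ⟨h1, h2, h3, h4⟩
            rcases List.mem_append.mp h2 with h | h
            · exact ⟨h1, h, h3, h4⟩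
            · simp at h; exact absurd h hzx
  · -- no shared line: no append, and the set-extension is invisible
    have hstep : pvStep m d x = d := by
      unfold pvStep
      split
      · simp
      · rfl
    rw [hstep]
    intro z hz
    rw [hd z hz]
    by_cases hxw : x ∈ w
    · rw [PySem.Set.add_of_mem hxw]
    · rw [PySem.Set.add_of_not_mem hxw]
      unfold pvIn
      by_cases hzm : z = m
      · simp [hzm, List.filter_append, hcx]
      · simp only [if_neg hzm]
        congr 1
        refine if_congr ?_ rfl rfl
        constructor
        · rintro ⟨h1, h2, h3, h4⟩
          exact ⟨h1, List.mem_append.mpr (Or.inl h2), h3, h4⟩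
        · rintro ⟨h1, h2, h3, h4⟩
          rcases List.mem_append.mp h2 with h | h
          · exact ⟨h1, h, h3, h4⟩
          · simp at h; subst h; exact absurd h4 hcx

-- the step at x = m is a no-op and the set extension is invisible
theorem pvStep_self (O S w : List (List (Int × Int))) (m : List (Int × Int))
    (d : PySem.Dict (List (Int × Int)) (List (List (Int × Int))))
    (hd : ∀ z ∈ O, d.getD z [] = pvIn S m w O z) :
    ∀ z ∈ O, (pvStep m d m).getD z [] = pvIn S m (PySem.Set.add w m) O z := by
  have hstep : pvStep m d m = d := by unfold pvStep; simp
  rw [hstep]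
  intro z hz
  rw [hd z hz]
  by_cases hmw : m ∈ w
  · rw [PySem.Set.add_of_mem hmw]
  · rw [PySem.Set.add_of_not_mem hmw]
    unfold pvIn
    by_cases hzm : z = m
    · simp [hzm, List.filter_append]
    · simp only [if_neg hzm]
      congr 1
      refine if_congr ?_ rfl rfl
      constructor
      · rintro ⟨h1, h2, h3, h4⟩
        exact ⟨h1, List.mem_append.mpr (Or.inl h2), h3, h4⟩
      · rintro ⟨h1, h2, h3, h4⟩
        rcases List.mem_append.mp h2 with h | h
        · exact ⟨h1, h, h3, h4⟩
        · simp at h; exact absurd h h3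

-- the inner loop of round m, from any seen-prefix w
theorem pv_inner_go (O S : List (List (Int × Int))) (m : List (Int × Int))
    (hmO : m ∈ O) (hmS : m ∉ S) :
    ∀ (rest w : List (List (Int × Int)))
      (d : PySem.Dict (List (Int × Int)) (List (List (Int × Int)))),
      (∀ y ∈ rest, y ∈ O) → d.keys = O →
      (∀ z ∈ O, d.getD z [] = pvIn S m (PySem.Set.ofList w) O z) →
      (rest.foldl (pvStep m) d).keys = O ∧
        ∀ z ∈ O, (rest.foldl (pvStep m) d).getD z [] = pvIn S m (PySem.Set.ofList (w ++ rest)) O z := by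
  intro rest
  induction rest with
  | nil => intro w d _ hk hd; simpa using ⟨hk, hd⟩
  | cons x xs ih =>
      intro w d hrest hk hd
      have hxO : x ∈ O := hrest x (by simp)
      have hk' : (pvStep m d x).keys = O := pvStep_keys m x d O hk hmO hxO
      have hd' : ∀ z ∈ O, (pvStep m d x).getD z [] = pvIn S m (PySem.Set.add (PySem.Set.ofList w) x) O z := by
        by_cases hxm : x = m
        · subst hxm; exact pvStep_self O S (PySem.Set.ofList w) x d hd
        · exact pvStep_getD O S (PySem.Set.ofList w) m x hmO hmS hxm d hk hd
      have := ih (w ++ [x]) (pvStep m d x) (fun y hy => hrest y (by simp [hy]))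
        hk' (by rw [PySem.Set.ofList_append_singleton]; exact hd')
      simpa [List.append_assoc] using this

-- at the end of round m the dict holds the S ++ [m] picture
theorem pvIn_final (S T : List (List (Int × Int))) (m x : List (Int × Int))
    (hnd : (S ++ T).Nodup) (hmS : m ∉ S) (hx : x ∈ S ++ T) :
    pvIn S m (S ++ T) (S ++ T) x = pvG (S ++ T) (S ++ [m]) x := by
  have hdisj : ∀ y ∈ T, y ∉ S := by
    rw [List.nodup_append] at hnd
    exact fun y hy hyS => hnd.2.2 y hyS y hy rfl
  by_cases hxm : x = m
  · subst hxm
    unfold pvIn pvG pvFull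
    rw [if_pos rfl, if_pos (show x ∈ S ++ [x] from List.mem_append.mpr (Or.inr (by simp))), List.filter_append (l₁ := S), List.filter_append (l₁ := S)]
    congr 1
    · exact List.filter_congr (fun y hy => by
        by_cases hyx : y = x
        · simp [hyx]
        · simp [sharesLine_comm y x])
    · have h1 : List.filter (fun y => decide (y ∉ S) && y != x && sharesLine x y) S = [] :=
        List.filter_eq_nil_iff.mpr (fun y hy => by simp [hy])
      rw [h1, List.nil_append]
      exact List.filter_congr (fun y hy => by simp [hdisj y hy])
  · by_cases hxS : x ∈ S
    · unfold pvIn pvG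
      rw [if_neg hxm, if_pos hxS,
        if_pos (show x ∈ S ++ [m] from List.mem_append.mpr (Or.inl hxS)),
        if_neg (show ¬(x ∉ S ∧ x ∈ S ++ T ∧ x ≠ m ∧ sharesLine m x = true) by
          rintro ⟨h, _, _, _⟩; exact h hxS)]
      simp
    · unfold pvIn pvG
      rw [if_neg hxm, if_neg hxS,
        if_neg (show ¬x ∈ S ++ [m] by simp [hxS, hxm]),
        List.filter_append (l₁ := S)]
      congr 1
      by_cases hcx : sharesLine m x = true
      · rw [if_pos ⟨hxS, hx, hxm, hcx⟩]
        simp [bne_iff_ne, Ne.symm hxm, hcx]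
      · rw [if_neg (by rintro ⟨_, _, _, h⟩; exact hcx h)]
        simp [hcx]

-- a round whose member was already processed changes nothing
theorem pv_outer_fixed (O S : List (List (Int × Int))) (m : List (Int × Int))
    (hmO : m ∈ O) (hmS : m ∈ S)
    (d : PySem.Dict (List (Int × Int)) (List (List (Int × Int))))
    (hd : ∀ z ∈ O, d.getD z [] = pvG O S z) :
    ∀ y ∈ O, pvStep m d y = d := by
  intro y hy
  by_cases hym : y = m
  · unfold pvStep; simp [hym]
  · have hdm : d.getD m [] = pvFull O m := by
      rw [hd m hmO]; unfold pvG; rw [if_pos hmS]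
    by_cases hcy : sharesLine m y = true
    · have : y ∈ d.getD m [] := by
        rw [hdm]; unfold pvFull
        exact List.mem_filter.mpr ⟨hy, by simp [bne_iff_ne, hym, hcy]⟩
      unfold pvStep
      simp [this]
    · unfold pvStep
      split
      · simp
      · rfl

-- the whole outer loop, from any processed prefix u
theorem pv_outer_go (ms : List (List (Int × Int))) :
    ∀ (rest u : List (List (Int × Int)))
      (d : PySem.Dict (List (Int × Int)) (List (List (Int × Int)))),
      ms = u ++ rest →
      d.keys = PySem.Set.ofList ms →
      (∀ z ∈ PySem.Set.ofList ms, d.getD z [] = pvG (PySem.Set.ofList ms) (PySem.Set.ofList u) z) →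
      (rest.foldl (fun d m => ms.foldl (pvStep m) d) d).keys = PySem.Set.ofList ms ∧
        ∀ z ∈ PySem.Set.ofList ms,
          (rest.foldl (fun d m => ms.foldl (pvStep m) d) d).getD z []
            = pvG (PySem.Set.ofList ms) (PySem.Set.ofList ms) z := by
  intro rest
  induction rest with
  | nil =>
      intro u d hsplit hk hd
      have hu : u = ms := by rw [hsplit, List.append_nil]
      subst hu
      exact ⟨hk, hd⟩
  | cons m rest' ih =>
      intro u d hsplit hk hd
      have hmO : m ∈ PySem.Set.ofList ms := by
        rw [PySem.Set.mem_ofList, hsplit]; simp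
      obtain ⟨T, hOT⟩ : ∃ T, PySem.Set.ofList ms = PySem.Set.ofList u ++ T := by
        rw [hsplit, PySem.Set.ofList_append, PySem.Set.update_eq_append_filter]
        exact ⟨_, rfl⟩
      by_cases hmS : m ∈ PySem.Set.ofList u
      · have hfix : ms.foldl (pvStep m) d = d :=
          pv_foldl_fixed ms (pvStep m) d (fun y hy =>
            pv_outer_fixed _ _ m hmO hmS d hd y (by rw [PySem.Set.mem_ofList]; exact hy))
        simp only [List.foldl_cons, hfix]
        refine ih (u ++ [m]) d (by rw [hsplit, List.append_assoc]; rfl) hk ?_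
        rw [PySem.Set.ofList_append_singleton, PySem.Set.add_of_mem hmS]
        exact hd
      · have hstart : ∀ z ∈ PySem.Set.ofList ms,
            d.getD z [] = pvIn (PySem.Set.ofList u) m (PySem.Set.ofList []) (PySem.Set.ofList ms) z := by
          intro z hz
          rw [hd z hz]
          unfold pvIn pvG
          by_cases hzm : z = m
          · rw [if_pos hzm, if_neg (hzm ▸ hmS)]
            simp [hzm]
          · rw [if_neg hzm,
              if_neg (show ¬(z ∉ PySem.Set.ofList u ∧
                  z ∈ PySem.Set.ofList ([] : List (List (Int × Int))) ∧
                  z ≠ m ∧ sharesLine m z = true) by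
                rintro ⟨_, h, _, _⟩; rw [PySem.Set.ofList_nil] at h; simp at h)]
            simp
        have hinner := pv_inner_go (PySem.Set.ofList ms) (PySem.Set.ofList u) m hmO hmS ms [] d
          (fun y hy => (PySem.Set.mem_ofList ms y).mpr hy) hk hstart
        rw [List.nil_append] at hinner
        simp only [List.foldl_cons]
        refine ih (u ++ [m]) (ms.foldl (pvStep m) d) (by rw [hsplit, List.append_assoc]; rfl)
          hinner.1 ?_
        intro z hz
        rw [hinner.2 z hz, PySem.Set.ofList_append_singleton, PySem.Set.add_of_not_mem hmS]
        have hnd : (PySem.Set.ofList u ++ T).Nodup := hOT ▸ PySem.Set.nodup_ofList ms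
        have := pvIn_final (PySem.Set.ofList u) T m z hnd hmS (hOT ▸ hz)
        rw [← hOT] at this
        exact this

-- the initialisation loop: every distinct member is a key with value []
theorem pv_init_keys (ms : List (List (Int × Int))) :
    (ms.foldl (fun d m => d.insert m ([] : List (List (Int × Int)))) PySem.Dict.empty).keys
      = PySem.Set.ofList ms := by
  rw [PySem.Dict.keys_foldl_insert ms (fun _ _ => []), PySem.Dict.keys_empty,
    PySem.Set.update_nil_left]

theorem pv_init_getD (ms : List (List (Int × Int))) :
    ∀ (d : PySem.Dict (List (Int × Int)) (List (List (Int × Int)))),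
      (∀ x, d.getD x [] = []) →
      ∀ x, (ms.foldl (fun d m => d.insert m []) d).getD x [] = [] := by
  induction ms with
  | nil => intro d h x; exact h x
  | cons m ms ih =>
      intro d h x
      refine ih _ (fun y => ?_) x
      rw [PySem.Dict.getD_insert]
      split <;> simp [h]

theorem pv_main (gp : List ((List (Int × Int)) × String × Int)) :
    Group_neighbors gp = Group_neighbors_alt gp := by
  have hB : Group_neighbors_alt gp =
      (PySem.Set.ofList (gp.map (·.1))).map
        (fun m => (m, pvFull (PySem.Set.ofList (gp.map (·.1))) m)) := by
    unfold Group_neighbors_alt pvFull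
    rw [PySem.Set.ofList_eq_foldl, List.foldl_map]
    rfl
  have hA : Group_neighbors gp =
      ((gp.map (·.1)).foldl
        (fun d m => (gp.map (·.1)).foldl (pvStep m) d)
        ((gp.map (·.1)).foldl (fun d m => d.insert m []) PySem.Dict.empty)).items := by
    unfold Group_neighbors pvStep
    simp only [List.foldl_map, ← conflicting_eq]
  rw [hA, hB]
  obtain ⟨hk, hd⟩ := pv_outer_go (gp.map (·.1)) (gp.map (·.1)) []
    ((gp.map (·.1)).foldl (fun d m => d.insert m []) PySem.Dict.empty)
    (by simp) (pv_init_keys _) (by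
      intro z hz
      rw [pv_init_getD _ _ (fun x => by rw [PySem.Dict.getD_empty]) z]
      unfold pvG
      rw [if_neg (by rw [PySem.Set.ofList_nil]; simp), PySem.Set.ofList_nil]
      simp)
  rw [PySem.Dict.items_eq_map_keys _ (hk ▸ PySem.Set.nodup_ofList _) [], hk]
  exact List.map_congr_left (fun m hm => by
    rw [hd m hm]
    unfold pvG
    rw [if_pos hm])

-- ===== VERDICT (by name: the statement is the Claim_ definition above) =====
theorem Group_neighbors_spec : Claim_equal_Group_neighbors := by
  intro gp _
  show Group_neighbors gp = Group_neighbors_alt gp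
  exact pv_main gp
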